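-- pv_equiv track=rewrite | github.com/kartikey20/LeetCode | prefix.py | dfs
-- ===== SOURCE A (Python) =====
-- def find_prefix(arr):
--     for i in range(len(arr)):
--         indices = set()
--         count = 0
--         s = arr[i][0]
--         for j in range(len(arr)):
--             if arr[j][0] == s:
--                 count += 1
--                 indices.add(j)
--                 if count == 2:
--                     return [s, indices]
--     return ["", set()]
--
-- def dfs(arr, count):
--     prefix, prefix_indices = find_prefix(arr)
--     if len(prefix_indices) == 0:
--         return count
--     else:
--         new_arr = [arr[i] for i in range(len(arr)) if i not in prefix_indices]
--         new_arr.append(prefix)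
--         return dfs(new_arr, count+1)
-- ===== SOURCE B (Python) =====
-- def dfs(arr, count):
--     # Each merge step of the original removes two strings sharing a first
--     # character and appends that character, i.e. it reduces the length by 1
--     # while keeping the SET of first characters unchanged; merging stops when
--     # all first characters are distinct.  So the number of merges is
--     # len(arr) - (number of distinct first characters).
--     return count + len(arr) - len({w[0] for w in arr})
-- ===== Notes on version B (the rewrite author's own statement) =====
-- stated objective: faster
-- what changed: Replaces the cubic recursive merge simulation by the closed form count + len(arr) - number of distinct first characters, since each merge step shrinks the list by one while preserving the set of first characters.
import Mathlib
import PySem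

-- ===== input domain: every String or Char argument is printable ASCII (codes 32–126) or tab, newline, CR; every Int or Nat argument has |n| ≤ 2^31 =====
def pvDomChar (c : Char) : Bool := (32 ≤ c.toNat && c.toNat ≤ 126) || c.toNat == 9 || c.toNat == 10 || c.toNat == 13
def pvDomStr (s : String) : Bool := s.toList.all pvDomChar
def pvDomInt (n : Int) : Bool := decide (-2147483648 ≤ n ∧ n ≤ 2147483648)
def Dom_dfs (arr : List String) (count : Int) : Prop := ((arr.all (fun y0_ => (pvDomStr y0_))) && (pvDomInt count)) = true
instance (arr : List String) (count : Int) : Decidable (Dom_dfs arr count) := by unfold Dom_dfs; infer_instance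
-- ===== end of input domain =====

-- B replaces A's cubic recursive merge simulation by the closed form
-- count + len(arr) - (number of distinct first characters).
-- Pre_dfs (all strings nonempty) excludes exactly the inputs on which A raises IndexError.

-- ===== PORT A =====

-- arr[i][0]; the ' ' default is unreachable under Pre_dfs (index in range, string nonempty)
def fcAtA (arr : List String) (i : Nat) : Char := (arr.getD i "").toList.headD ' '

-- the inner 'for j in range(len(arr))' loop of find_prefix, from index j with
-- running state (count, indices); returns the [s, indices] early return, none = loop fell through
def fpInner (arr : List String) (s : Char) (j : Nat) (count : Nat) (indices : PySem.Set Int) :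
    Option (Char × PySem.Set Int) :=
  if _h : j < arr.length then
    if fcAtA arr j = s then
      if count + 1 = 2 then some (s, PySem.Set.add indices (j : Int))
      else fpInner arr s (j + 1) (count + 1) (PySem.Set.add indices (j : Int))
    else fpInner arr s (j + 1) count indices
  else none
termination_by arr.length - j

-- the outer 'for i in range(len(arr))' loop of find_prefix
def fpOuter (arr : List String) (i : Nat) : String × PySem.Set Int :=
  if _h : i < arr.length then
    match fpInner arr (fcAtA arr i) 0 0 PySem.Set.empty with
    | some (s, indices) => (String.ofList [s], indices)
    | none => fpOuter arr (i + 1)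
  else ("", PySem.Set.empty)
termination_by arr.length - i

def find_prefix (arr : List String) : String × PySem.Set Int := fpOuter arr 0

-- the recursion, with fuel arr.length + 1: each recursive call has a strictly
-- shorter list (proved in dfsFuel_closed below), so the fuel is never exhausted
def dfsFuel : Nat → List String → Int → Int
  | 0, _, count => count
  | fuel + 1, arr, count =>
    match find_prefix arr with
    | (pre, prefix_indices) =>
      if prefix_indices.length = 0 then count
      else
        dfsFuel fuel
          (((List.range arr.length).filter
              (fun i => !(PySem.Set.contains prefix_indices (Int.ofNat i)))).map
              (fun i => arr.getD i "") ++ [pre])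
          (count + 1)

def dfs (arr : List String) (count : Int) : Int := dfsFuel (arr.length + 1) arr count

-- ===== PORT B =====

-- w[0]; the ' ' default is unreachable under Pre_dfs
def fcB (w : String) : Char := w.toList.headD ' '

def dfs_alt (arr : List String) (count : Int) : Int :=
  count + (arr.length : Int) - ((PySem.Set.ofList (arr.map fcB)).length : Int)

-- ===== PRECONDITION & SPEC =====
-- exactly the inputs on which A returns: with an empty string present, A's scan
-- (now or in a later recursive call) evaluates ''[0] and raises IndexError
def Pre_dfs (arr : List String) (count : Int) : Prop := ∀ s ∈ arr, s ≠ ""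
instance (arr : List String) (count : Int) : Decidable (Pre_dfs arr count) := by
  unfold Pre_dfs; infer_instance

def pvWitness_dfs : List String × Int := (["ab", "cd", "ax"], 0)

def Spec_dfs (arr : List String) (count : Int) (out : Int) : Prop := out = dfs_alt arr count
instance (arr : List String) (count : Int) (out : Int) : Decidable (Spec_dfs arr count out) := by
  unfold Spec_dfs; infer_instance

-- ===== CLAIM (what is proved, stated in full; the proofs are below) =====
def Claim_equal_dfs : Prop := ∀ (arr : List String) (count : Int), Dom_dfs arr count → Pre_dfs arr count → Spec_dfs arr count (dfs arr count)

-- ===== LEMMAS AND PROOFS =====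

theorem fpInner_one_some (arr : List String) (s : Char) (a : Int) :
    ∀ j s' t', fpInner arr s j 1 [a] = some (s', t') →
      s' = s ∧ ∃ k, j ≤ k ∧ k < arr.length ∧ fcAtA arr k = s ∧
        t' = PySem.Set.add [a] (k : Int) := by
  have key : ∀ m j s' t', arr.length - j ≤ m → fpInner arr s j 1 [a] = some (s', t') →
      s' = s ∧ ∃ k, j ≤ k ∧ k < arr.length ∧ fcAtA arr k = s ∧
        t' = PySem.Set.add [a] (k : Int) := by
    intro m
    induction m with
    | zero =>
      intro j s' t' hm heq
      rw [fpInner] at heq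
      rw [dif_neg (by omega)] at heq
      exact absurd heq (by simp)
    | succ m IH =>
      intro j s' t' hm heq
      rw [fpInner] at heq
      by_cases hj : j < arr.length
      · rw [dif_pos hj] at heq
        by_cases hfc : fcAtA arr j = s
        · rw [if_pos hfc, if_pos rfl] at heq
          simp only [Option.some.injEq, Prod.mk.injEq] at heq
          exact ⟨heq.1.symm, j, le_rfl, hj, hfc, heq.2.symm⟩
        · rw [if_neg hfc] at heq
          obtain ⟨hs, k, hk1, hk2, hk3, hk4⟩ := IH (j+1) s' t' (by omega) heq
          exact ⟨hs, k, by omega, hk2, hk3, hk4⟩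
      · rw [dif_neg hj] at heq; exact absurd heq (by simp)
  exact fun j s' t' => key (arr.length - j) j s' t' le_rfl

theorem fpInner_one_none (arr : List String) (s : Char) (t : PySem.Set Int) :
    ∀ j, fpInner arr s j 1 t = none →
      ∀ k, j ≤ k → k < arr.length → fcAtA arr k ≠ s := by
  have key : ∀ m j, arr.length - j ≤ m → fpInner arr s j 1 t = none →
      ∀ k, j ≤ k → k < arr.length → fcAtA arr k ≠ s := by
    intro m
    induction m with
    | zero => intro j hm _ k hk1 hk2; omega
    | succ m IH =>
      intro j hm heq k hk1 hk2
      rw [fpInner] at heq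
      by_cases hj : j < arr.length
      · rw [dif_pos hj] at heq
        by_cases hfc : fcAtA arr j = s
        · rw [if_pos hfc, if_pos rfl] at heq; exact absurd heq (by simp)
        · rw [if_neg hfc] at heq
          rcases Nat.eq_or_lt_of_le hk1 with rfl | hlt
          · exact hfc
          · exact IH (j + 1) (by omega) heq k (by omega) hk2
      · omega
  exact fun j => key (arr.length - j) j le_rfl

theorem fpInner_zero_some (arr : List String) (s : Char) :
    ∀ j s' t', fpInner arr s j 0 [] = some (s', t') →
      s' = s ∧ ∃ k1 k2, j ≤ k1 ∧ k1 < k2 ∧ k2 < arr.length ∧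
        fcAtA arr k1 = s ∧ fcAtA arr k2 = s ∧ t' = [(k1 : Int), (k2 : Int)] := by
  have key : ∀ m j s' t', arr.length - j ≤ m → fpInner arr s j 0 [] = some (s', t') →
      s' = s ∧ ∃ k1 k2, j ≤ k1 ∧ k1 < k2 ∧ k2 < arr.length ∧
        fcAtA arr k1 = s ∧ fcAtA arr k2 = s ∧ t' = [(k1 : Int), (k2 : Int)] := by
    intro m
    induction m with
    | zero =>
      intro j s' t' hm heq
      rw [fpInner, dif_neg (by omega)] at heq
      exact absurd heq (by simp)
    | succ m IH =>
      intro j s' t' hm heq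
      rw [fpInner] at heq
      by_cases hj : j < arr.length
      · rw [dif_pos hj] at heq
        by_cases hfc : fcAtA arr j = s
        · rw [if_pos hfc, if_neg (by omega)] at heq
          have hadd : PySem.Set.add ([] : PySem.Set Int) (j : Int) = [(j : Int)] := rfl
          rw [hadd] at heq
          obtain ⟨hs, k2, hk2a, hk2b, hk2c, hk2d⟩ := fpInner_one_some arr s (j : Int) (j + 1) s' t' heq
          refine ⟨hs, j, k2, le_rfl, by omega, hk2b, hfc, hk2c, ?_⟩
          rw [hk2d, PySem.Set.add_of_not_mem (by simp; omega)]; rfl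
        · rw [if_neg hfc] at heq
          obtain ⟨hs, k1, k2, h1, h2, h3, h4, h5, h6⟩ := IH (j + 1) s' t' (by omega) heq
          exact ⟨hs, k1, k2, by omega, h2, h3, h4, h5, h6⟩
      · rw [dif_neg hj] at heq; exact absurd heq (by simp)
  exact fun j s' t' => key (arr.length - j) j s' t' le_rfl

theorem fpInner_zero_none (arr : List String) (s : Char) :
    ∀ j, fpInner arr s j 0 [] = none →
      ∀ k1 k2, j ≤ k1 → k1 < k2 → k2 < arr.length →
        ¬(fcAtA arr k1 = s ∧ fcAtA arr k2 = s) := by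
  have key : ∀ m j, arr.length - j ≤ m → fpInner arr s j 0 [] = none →
      ∀ k1 k2, j ≤ k1 → k1 < k2 → k2 < arr.length →
        ¬(fcAtA arr k1 = s ∧ fcAtA arr k2 = s) := by
    intro m
    induction m with
    | zero => intro j hm _ k1 k2 h1 h2 h3; omega
    | succ m IH =>
      intro j hm heq k1 k2 h1 h2 h3
      rw [fpInner] at heq
      by_cases hj : j < arr.length
      · rw [dif_pos hj] at heq
        by_cases hfc : fcAtA arr j = s
        · rw [if_pos hfc, if_neg (by omega)] at heq
          have hnone := fpInner_one_none arr s _ (j + 1) heq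
          rcases Nat.eq_or_lt_of_le h1 with rfl | hlt
          · exact fun ⟨_, hb⟩ => hnone k2 (by omega) h3 hb
          · exact fun ⟨ha, _⟩ => hnone k1 (by omega) (by omega) ha
        · rw [if_neg hfc] at heq
          rcases Nat.eq_or_lt_of_le h1 with rfl | hlt
          · exact fun ⟨ha, _⟩ => hfc ha
          · exact IH (j + 1) (by omega) heq k1 k2 (by omega) h2 h3
      · omega
  exact fun j => key (arr.length - j) j le_rfl

theorem fpOuter_some (arr : List String) :
    ∀ i p t, fpOuter arr i = (p, t) → t ≠ [] →
      ∃ c k1 k2, k1 < k2 ∧ k2 < arr.length ∧ fcAtA arr k1 = c ∧ fcAtA arr k2 = c ∧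
        p = String.ofList [c] ∧ t = [(k1 : Int), (k2 : Int)] := by
  have key : ∀ m i p t, arr.length - i ≤ m → fpOuter arr i = (p, t) → t ≠ [] →
      ∃ c k1 k2, k1 < k2 ∧ k2 < arr.length ∧ fcAtA arr k1 = c ∧ fcAtA arr k2 = c ∧
        p = String.ofList [c] ∧ t = [(k1 : Int), (k2 : Int)] := by
    intro m
    induction m with
    | zero =>
      intro i p t hm heq hne
      rw [fpOuter, dif_neg (by omega)] at heq
      cases heq; exact absurd rfl hne
    | succ m IH =>
      intro i p t hm heq hne
      rw [fpOuter] at heq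
      by_cases hi : i < arr.length
      · rw [dif_pos hi] at heq
        rcases hin : fpInner arr (fcAtA arr i) 0 0 PySem.Set.empty with _ | ⟨s, idxs⟩
        · rw [hin] at heq
          exact IH (i + 1) p t (by omega) heq hne
        · rw [hin] at heq
          obtain ⟨hs, k1, k2, _, h2, h3, h4, h5, h6⟩ := fpInner_zero_some arr (fcAtA arr i) 0 s idxs hin
          cases heq
          exact ⟨fcAtA arr i, k1, k2, h2, h3, h4, h5, by rw [hs], h6⟩
      · rw [dif_neg hi] at heq
        cases heq; exact absurd rfl hne
  exact fun i p t => key (arr.length - i) i p t le_rfl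

theorem fpOuter_none (arr : List String) :
    ∀ i p, fpOuter arr i = (p, []) →
      ∀ I k, i ≤ I → I < arr.length → k < arr.length → k ≠ I →
        fcAtA arr k ≠ fcAtA arr I := by
  have key : ∀ m i p, arr.length - i ≤ m → fpOuter arr i = (p, []) →
      ∀ I k, i ≤ I → I < arr.length → k < arr.length → k ≠ I →
        fcAtA arr k ≠ fcAtA arr I := by
    intro m
    induction m with
    | zero => intro i p hm _ I k h1 h2 h3 h4; omega
    | succ m IH =>
      intro i p hm heq I k h1 h2 h3 h4
      rw [fpOuter] at heq
      by_cases hi : i < arr.length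
      · rw [dif_pos hi] at heq
        rcases hin : fpInner arr (fcAtA arr i) 0 0 PySem.Set.empty with _ | ⟨s, idxs⟩
        · rw [hin] at heq
          rcases Nat.eq_or_lt_of_le h1 with h1e | hlt
          · subst h1e
            have hnone := fpInner_zero_none arr (fcAtA arr i) 0 hin
            rcases Nat.lt_or_ge k i with hk | hk
            · exact fun hc => hnone k i (by omega) hk h2 ⟨hc, rfl⟩
            · exact fun hc => hnone i k (by omega) (by omega) h3 ⟨rfl, hc⟩
          · exact IH (i + 1) p (by omega) heq I k (by omega) h2 h3 h4
        · rw [hin] at heq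
          obtain ⟨_, k1, k2, _, _, _, _, _, h6⟩ := fpInner_zero_some arr (fcAtA arr i) 0 s idxs hin
          cases heq
          simp at h6
      · omega
  exact fun i p => key (arr.length - i) i p le_rfl

theorem ofList_length_eq_card (a : List Char) :
    (PySem.Set.ofList a).length = a.toFinset.card := by
  have h1 : (PySem.Set.ofList a).toFinset = a.toFinset := by
    ext x; simp [List.mem_toFinset, PySem.Set.mem_ofList]
  rw [← h1, List.toFinset_card_of_nodup (PySem.Set.nodup_ofList a)]

theorem setlen_congr (a b : List Char) (h : a.toFinset = b.toFinset) :
    (PySem.Set.ofList a).length = (PySem.Set.ofList b).length := by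
  rw [ofList_length_eq_card, ofList_length_eq_card, h]

-- length of range-filter dropping two distinct positions

theorem filter_two_length (k1 k2 : Nat) (hne : k1 ≠ k2) :
    ∀ m, ((List.range m).filter (fun i => decide ¬(i = k1 ∨ i = k2))).length
      = m - ((if k1 < m then 1 else 0) + (if k2 < m then 1 else 0)) := by
  intro m
  induction m with
  | zero => rfl
  | succ m IH =>
    rw [List.range_succ, List.filter_append, List.length_append, IH]
    by_cases h1 : m = k1 <;> by_cases h2 : m = k2 <;>
      simp [List.filter, h1, h2] <;> split_ifs <;> omega

theorem fcAtA_eq_fcB (arr : List String) (k : Nat) (h : k < arr.length) :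
    fcAtA arr k = fcB arr[k] := by
  unfold fcAtA fcB; rw [List.getD_eq_getElem arr "" h]

theorem contains_pair (k1 k2 i : Nat) :
    (!(PySem.Set.contains [(k1 : Int), (k2 : Int)] (Int.ofNat i))) = decide ¬(i = k1 ∨ i = k2) := by
  by_cases h : i = k1 ∨ i = k2
  · rcases h with rfl | rfl <;> simp [PySem.Set.contains_eq_listContains]
  · push Not at h
    simp only [PySem.Set.contains_eq_listContains]
    simp [Int.ofNat_eq_natCast, h.1, h.2]

theorem map_fcB_nodup (arr : List String) (p : String)
    (h : fpOuter arr 0 = (p, [])) : (arr.map fcB).Nodup := by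
  rw [List.Nodup, List.pairwise_iff_getElem]
  intro i j hi hj hij
  simp only [List.length_map] at hi hj
  rw [List.getElem_map, List.getElem_map, ← fcAtA_eq_fcB arr i hi, ← fcAtA_eq_fcB arr j hj]
  exact fpOuter_none arr 0 p h j i (by omega) hj hi (by omega)

theorem fcB_singleton (c : Char) : fcB (String.ofList [c]) = c := by simp [fcB]

theorem new_toFinset (arr : List String) (c : Char) (k1 k2 : Nat) (hk12 : k1 < k2)
    (hk2 : k2 < arr.length) (hc1 : fcAtA arr k1 = c) (hc2 : fcAtA arr k2 = c) :
    ((((List.range arr.length).filter (fun i => decide ¬(i = k1 ∨ i = k2))).map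
        (fun i => arr.getD i "") ++ [String.ofList [c]]).map fcB).toFinset
      = (arr.map fcB).toFinset := by
  ext x
  simp only [List.map_append, List.map_map, List.toFinset_append, Finset.mem_union,
    List.mem_toFinset, List.mem_map, List.mem_filter, List.mem_range, List.map_cons,
    List.map_nil, List.mem_singleton, Function.comp, decide_not, Bool.not_eq_eq_eq_not,
    Bool.not_true, decide_eq_false_iff_not]
  constructor
  · rintro (⟨i, ⟨hi, hnot⟩, rfl⟩ | rfl)
    · exact ⟨arr[i], List.getElem_mem hi, by rw [List.getD_eq_getElem arr "" hi]⟩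
    · refine ⟨arr[k1], List.getElem_mem (by omega), ?_⟩
      rw [fcB_singleton, ← hc1, fcAtA_eq_fcB arr k1 (by omega)]
  · rintro ⟨w, hw, rfl⟩
    obtain ⟨i, hi, rfl⟩ := List.mem_iff_getElem.mp hw
    by_cases hik : i = k1 ∨ i = k2
    · right
      rw [fcB_singleton]
      rcases hik with rfl | rfl
      · rw [← fcAtA_eq_fcB arr i hi, hc1]
      · rw [← fcAtA_eq_fcB arr i hi, hc2]
    · left
      exact ⟨i, ⟨hi, by tauto⟩, by rw [List.getD_eq_getElem arr "" hi]⟩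

theorem dfsFuel_closed :
    ∀ fuel arr count, (∀ s ∈ arr, s ≠ "") → arr.length < fuel →
      dfsFuel fuel arr count =
        count + (arr.length : Int) - ((PySem.Set.ofList (arr.map fcB)).length : Int) := by
  intro fuel
  induction fuel with
  | zero => intro arr count _ h; exact absurd h (Nat.not_lt_zero _)
  | succ fuel IH =>
    intro arr count hpre hlen
    rcases hfp : find_prefix arr with ⟨pre, idxs⟩
    rw [dfsFuel, hfp]; dsimp only
    by_cases hempty : idxs.length = 0
    · rw [if_pos hempty]
      have hnil : idxs = [] := List.length_eq_zero_iff.mp hempty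
      have hnodup := map_fcB_nodup arr pre (by rw [← hnil]; exact hfp)
      rw [PySem.Set.ofList_eq_self_of_nodup _ hnodup, List.length_map]
      omega
    · rw [if_neg hempty]
      have hne : idxs ≠ [] := fun h => hempty (by rw [h]; rfl)
      obtain ⟨c, k1, k2, hk12, hk2, hc1, hc2, hpre_eq, hidxs⟩ := fpOuter_some arr 0 pre idxs hfp hne
      subst hpre_eq; subst hidxs
      have hfiltc : (List.range arr.length).filter
            (fun i => !(PySem.Set.contains [(k1 : Int), (k2 : Int)] (Int.ofNat i)))
          = (List.range arr.length).filter (fun i => decide ¬(i = k1 ∨ i = k2)) :=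
        List.filter_congr (fun i _ => contains_pair k1 k2 i)
      rw [hfiltc]
      have hlenL : (((List.range arr.length).filter (fun i => decide ¬(i = k1 ∨ i = k2))).map
          (fun i => arr.getD i "") ++ [String.ofList [c]]).length = arr.length - 1 := by
        rw [List.length_append, List.length_map, filter_two_length k1 k2 (by omega) arr.length]
        simp only [if_pos (show k1 < arr.length by omega), if_pos hk2, List.length_singleton]
        omega
      have hpreL : ∀ s ∈ (((List.range arr.length).filter (fun i => decide ¬(i = k1 ∨ i = k2))).map
          (fun i => arr.getD i "") ++ [String.ofList [c]]), s ≠ "" := by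
        intro s hs
        rw [List.mem_append] at hs
        rcases hs with hs | hs
        · obtain ⟨i, hi, rfl⟩ := List.mem_map.mp hs
          have hi' : i < arr.length := List.mem_range.mp (List.mem_filter.mp hi).1
          rw [List.getD_eq_getElem arr "" hi']
          exact hpre _ (List.getElem_mem hi')
        · rw [List.mem_singleton] at hs; subst hs
          intro h; exact absurd (congrArg String.toList h) (by simp)
      have hsetlen := setlen_congr _ _ (new_toFinset arr c k1 k2 hk12 hk2 hc1 hc2)
      rw [IH _ (count + 1) hpreL (by omega), hsetlen, hlenL]
      omega

-- ===== VERDICT (by name: the statement is the Claim_ definition above) =====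
theorem dfs_spec : Claim_equal_dfs := by
  intro arr count _hdom hpre
  unfold Spec_dfs dfs dfs_alt
  exact dfsFuel_closed (arr.length + 1) arr count hpre (Nat.lt_succ_self _)
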